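-- pv_equiv track=rewrite | github.com/eitanspi/polar-codes-mac | results/clean_titles.py | make_title_lines
-- ===== SOURCE A (Python) =====
-- def make_title_lines(title, max_len=55):
--     """Split a long title into 2 lines at the best comma."""
--     if len(title) <= max_len:
--         return title
--     # Find the comma closest to the middle
--     mid = len(title) // 2
--     commas = [i for i, ch in enumerate(title) if ch == ',']
--     if not commas:
--         return title
--     best = min(commas, key=lambda i: abs(i - mid))
--     return title[:best+1].strip() + '\n' + title[best+1:].strip()
-- ===== SOURCE B (Python) =====
-- def make_title_lines(title, max_len=55):
--     """Split a long title into 2 lines at the best comma."""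
--     n = len(title)
--     if n <= max_len:
--         return title
--     mid = n // 2
--     # Search outward from the middle; at each distance try the left index
--     # first, so an equidistant left comma wins (Python min's tie-break).
--     d = 0
--     while d < n:
--         if d <= mid and title[mid - d] == ',':
--             best = mid - d
--             return title[:best + 1].strip() + '\n' + title[best + 1:].strip()
--         if mid + d < n and title[mid + d] == ',':
--             best = mid + d
--             return title[:best + 1].strip() + '\n' + title[best + 1:].strip()
--         d += 1
--     return title
-- ===== Notes on version B (the rewrite author's own statement) =====
-- stated objective: alternative
-- what changed: Instead of collecting all comma indices and taking min by distance to the middle, B searches outward from the middle index, testing the left candidate before the right at each distance (reproducing min's first-occurrence tie-break) and stopping at the first comma found.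
import Mathlib
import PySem

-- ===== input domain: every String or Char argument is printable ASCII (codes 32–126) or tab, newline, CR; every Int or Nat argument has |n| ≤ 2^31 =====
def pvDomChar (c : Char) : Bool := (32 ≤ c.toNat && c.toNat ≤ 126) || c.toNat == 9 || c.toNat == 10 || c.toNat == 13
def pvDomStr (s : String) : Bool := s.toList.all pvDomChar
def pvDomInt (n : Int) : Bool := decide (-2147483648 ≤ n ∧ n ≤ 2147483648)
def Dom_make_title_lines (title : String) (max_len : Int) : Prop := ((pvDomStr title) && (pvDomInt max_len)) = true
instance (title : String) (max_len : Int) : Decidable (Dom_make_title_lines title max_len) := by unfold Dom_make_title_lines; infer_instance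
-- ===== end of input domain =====

-- B changes the algorithm: an outward search from the middle index (left candidate first, matching
-- min's first-occurrence tie-break) replaces A's collect-all-comma-indices-then-min-by-distance;
-- same cost class, no speed claim.

-- ===== PORT A =====
def make_title_lines (title : String) (max_len : Int) : String :=
  let cs := title.toList
  if (cs.length : Int) ≤ max_len then title
  else
    let mid : Int := PySem.Int.floordiv (cs.length : Int) 2
    let commas : List Int :=
      ((PySem.List.enumerate cs).filter (fun p => p.2 == ',')).map Prod.fst
    if commas = [] then title
    else
      match PySem.List.min? commas (fun i => |i - mid|) with
      | none => title
      | some best =>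
          String.ofList
            (PySem.Chars.strip (PySem.List.slice cs none (some (best + 1))) ++
              '\n' :: PySem.Chars.strip (PySem.List.slice cs (some (best + 1)) none))

-- ===== PORT B =====
-- B's while-loop over growing distance d, transcribed as fuel recursion (fuel = n bounds the loop).
def searchComma (cs : List Char) (m : Nat) : Nat → Nat → Option Nat
  | _, 0 => none
  | d, fuel + 1 =>
    if d ≤ m ∧ cs[m - d]? = some ',' then some (m - d)
    else if m + d < cs.length ∧ cs[m + d]? = some ',' then some (m + d)
    else searchComma cs m (d + 1) fuel

def make_title_lines_alt (title : String) (max_len : Int) : String :=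
  let cs := title.toList
  let n := cs.length
  if (n : Int) ≤ max_len then title
  else
    let mid := n / 2
    match searchComma cs mid 0 n with
    | none => title
    | some best =>
        String.ofList
          (PySem.Chars.strip (cs.take (best + 1)) ++
            '\n' :: PySem.Chars.strip (cs.drop (best + 1)))

-- ===== PRECONDITION & SPEC =====
def Spec_make_title_lines (title : String) (max_len : Int) (out : String) : Prop := out = make_title_lines_alt title max_len
instance (title : String) (max_len : Int) (out : String) : Decidable (Spec_make_title_lines title max_len out) := by unfold Spec_make_title_lines; infer_instance

-- ===== CLAIM (what is proved, stated in full; the proofs are below) =====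
def Claim_equal_make_title_lines : Prop := ∀ (title : String) (max_len : Int), Dom_make_title_lines title max_len → Spec_make_title_lines title max_len (make_title_lines title max_len)

-- ===== LEMMAS AND PROOFS =====

-- distance of index k from the midpoint m, on Nat
def cdist (m k : Nat) : Nat := if k ≤ m then m - k else k - m

lemma abs_eq_cdist (m k : Nat) : |(k : Int) - (m : Int)| = ((cdist m k : Nat) : Int) := by
  unfold cdist
  split
  · rw [abs_of_nonpos (by omega)]; omega
  · rw [abs_of_pos (by omega)]; omega

-- comma positions with their enumerate offsets
def commaIdxI : List Char → Int → List Int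
  | [], _ => []
  | x :: t, s => if x = ',' then s :: commaIdxI t (s + 1) else commaIdxI t (s + 1)

lemma enum_comma (cs : List Char) (s : Int) :
    ((PySem.List.enumerate cs s).filter (fun p => p.2 == ',')).map Prod.fst = commaIdxI cs s := by
  induction cs generalizing s with
  | nil => simp [PySem.List.enumerate, commaIdxI]
  | cons x t ih =>
    rw [PySem.List.enumerate_cons]
    by_cases hx : x = ','
    · simp [commaIdxI, hx, List.filter_cons, ih]
    · simp [commaIdxI, hx, List.filter_cons, ih]

lemma mem_commaIdxI (cs : List Char) (s j : Int) :
    j ∈ commaIdxI cs s ↔ ∃ k : Nat, j = s + (k : Int) ∧ cs[k]? = some ',' := by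
  induction cs generalizing s with
  | nil => simp [commaIdxI]
  | cons x t ih =>
    simp only [commaIdxI]
    constructor
    · intro hj
      split at hj
      · rcases List.mem_cons.mp hj with h | h
        · exact ⟨0, by omega, by simp_all⟩
        · obtain ⟨k, hk1, hk2⟩ := (ih (s + 1)).mp h
          exact ⟨k + 1, by push_cast; omega, by simpa using hk2⟩
      · obtain ⟨k, hk1, hk2⟩ := (ih (s + 1)).mp hj
        exact ⟨k + 1, by push_cast; omega, by simpa using hk2⟩
    · rintro ⟨k, hk1, hk2⟩
      cases k with
      | zero =>
        have hx : x = ',' := by simpa using hk2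
        simp [hx, hk1]
      | succ k =>
        have hmem : j ∈ commaIdxI t (s + 1) :=
          (ih (s + 1)).mpr ⟨k, by push_cast at hk1 ⊢; omega, by simpa using hk2⟩
        split
        · exact List.mem_cons_of_mem _ hmem
        · exact hmem

lemma pairwise_commaIdxI (cs : List Char) (s : Int) : (commaIdxI cs s).Pairwise (· < ·) := by
  induction cs generalizing s with
  | nil => simp [commaIdxI]
  | cons x t ih =>
    simp only [commaIdxI]
    split
    · refine List.Pairwise.cons ?_ (ih (s + 1))
      intro j hj
      obtain ⟨k, hk1, _⟩ := (mem_commaIdxI t (s + 1) j).mp hj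
      omega
    · exact ih (s + 1)

-- first-minimum fold, matching PySem.List.min?'s accumulator
def fmin (key : Int → Int) : Int → List Int → Int
  | m, [] => m
  | m, x :: xs => if key x < key m then fmin key x xs else fmin key m xs

lemma min?_cons_cons (key : Int → Int) (c x : Int) (t : List Int) :
    PySem.List.min? (c :: x :: t) key
      = PySem.List.min? ((if key x < key c then x else c) :: t) key := by
  simp only [PySem.List.min?, List.foldl_cons]
  split <;> rfl

lemma min?_eq_fmin (key : Int → Int) (rest : List Int) :
    ∀ c, PySem.List.min? (c :: rest) key = some (fmin key c rest) := by
  induction rest with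
  | nil => intro c; rfl
  | cons x t ih =>
    intro c
    rw [min?_cons_cons, ih]
    simp only [fmin]
    split <;> rfl

lemma fmin_split (key : Int → Int) (xs : List Int) (m : Int) :
    (fmin key m xs = m ∧ ∀ y ∈ xs, key m ≤ key y) ∨
    (∃ pre post, xs = pre ++ fmin key m xs :: post ∧ key (fmin key m xs) < key m ∧
      (∀ y ∈ pre, key (fmin key m xs) < key y) ∧ (∀ y ∈ post, key (fmin key m xs) ≤ key y)) := by
  induction xs generalizing m with
  | nil => left; exact ⟨rfl, by simp⟩
  | cons x t ih =>
    simp only [fmin]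
    split
    · rename_i hlt
      rcases ih x with ⟨heq, hall⟩ | ⟨pre, post, hsplit, hklt, hpre, hpost⟩
      · right
        exact ⟨[], t, by simp only [List.nil_append, heq], by rw [heq]; exact hlt,
          by simp, by rw [heq]; exact hall⟩
      · right
        refine ⟨x :: pre, post, by rw [List.cons_append, ← hsplit], lt_trans hklt hlt, ?_, hpost⟩
        intro y hy
        rcases List.mem_cons.mp hy with h | h
        · rw [h]; exact hklt
        · exact hpre y h
    · rename_i hge
      push_neg at hge
      rcases ih m with ⟨heq, hall⟩ | ⟨pre, post, hsplit, hklt, hpre, hpost⟩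
      · left
        refine ⟨heq, ?_⟩
        intro y hy
        rcases List.mem_cons.mp hy with h | h
        · rw [h]; exact hge
        · exact hall y h
      · right
        refine ⟨x :: pre, post, by rw [List.cons_append, ← hsplit], hklt, ?_, hpost⟩
        intro y hy
        rcases List.mem_cons.mp hy with h | h
        · rw [h]; exact lt_of_lt_of_le hklt hge
        · exact hpre y h

lemma cdist_eq_iff (m k d : Nat) : cdist m k = d ↔ (d ≤ m ∧ k = m - d) ∨ k = m + d := by
  unfold cdist; split <;> omega

lemma search_some (cs : List Char) (m : Nat) :
    ∀ fuel d b, searchComma cs m d fuel = some b →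
      cs[b]? = some ',' ∧ d ≤ cdist m b ∧
      (∀ k, cs[k]? = some ',' → d ≤ cdist m k → cdist m b ≤ cdist m k) ∧
      (∀ k, cs[k]? = some ',' → cdist m k = cdist m b → b ≤ k) := by
  intro fuel
  induction fuel with
  | zero => intro d b h; simp [searchComma] at h
  | succ f ih =>
    intro d b h
    simp only [searchComma] at h
    split at h
    · rename_i hleft
      obtain ⟨hdm, hcomma⟩ := hleft
      obtain rfl : m - d = b := Option.some.inj h
      have hdist : cdist m (m - d) = d := by unfold cdist; split <;> omega
      refine ⟨hcomma, by omega, fun k _ hk => by omega, ?_⟩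
      intro k hk hkd
      rw [hdist] at hkd
      rcases (cdist_eq_iff m k d).mp hkd with ⟨_, h2⟩ | h2 <;> omega
    · split at h
      · rename_i hL hR
        obtain ⟨hlen, hcomma⟩ := hR
        obtain rfl : m + d = b := Option.some.inj h
        have hdist : cdist m (m + d) = d := by unfold cdist; split <;> omega
        refine ⟨hcomma, by omega, fun k _ hk => by omega, ?_⟩
        intro k hk hkd
        rw [hdist] at hkd
        rcases (cdist_eq_iff m k d).mp hkd with ⟨h1, h2⟩ | h2
        · exact absurd ⟨h1, h2 ▸ hk⟩ hL
        · omega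
      · rename_i hL hR
        obtain ⟨h1, h2, h3, h4⟩ := ih (d + 1) b h
        have hstep : ∀ k, cs[k]? = some ',' → d ≤ cdist m k → d + 1 ≤ cdist m k := by
          intro k hk hdk
          rcases Nat.lt_or_ge (cdist m k) (d + 1) with hlt | hge
          · exfalso
            have hd : cdist m k = d := by omega
            rcases (cdist_eq_iff m k d).mp hd with ⟨ha, hb⟩ | hb
            · exact hL ⟨ha, hb ▸ hk⟩
            · have hkl : k < cs.length := (List.getElem?_eq_some_iff.mp hk).1
              exact hR ⟨hb ▸ hkl, hb ▸ hk⟩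
          · exact hge
        exact ⟨h1, by omega, fun k hk hdk => h3 k hk (hstep k hk hdk), h4⟩

lemma search_none (cs : List Char) (m : Nat) :
    ∀ fuel d, searchComma cs m d fuel = none →
      ∀ k, cs[k]? = some ',' → cdist m k < d ∨ d + fuel ≤ cdist m k := by
  intro fuel
  induction fuel with
  | zero => intro d _ k _; omega
  | succ f ih =>
    intro d h k hk
    simp only [searchComma] at h
    split at h
    · exact absurd h (by simp)
    · split at h
      · exact absurd h (by simp)
      · rename_i hL hR
        rcases ih (d + 1) h k hk with hlt | hge
        · rcases Nat.lt_or_ge (cdist m k) d with h' | h'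
          · exact Or.inl h'
          · exfalso
            have hd : cdist m k = d := by omega
            rcases (cdist_eq_iff m k d).mp hd with ⟨h1, h2⟩ | h2
            · exact hL ⟨h1, h2 ▸ hk⟩
            · have hkl : k < cs.length := (List.getElem?_eq_some_iff.mp hk).1
              exact hR ⟨h2 ▸ hkl, h2 ▸ hk⟩
        · right; omega

-- membership in commaIdxI cs 0 in Nat form
lemma mem_commaIdxI_zero (cs : List Char) (j : Int) :
    j ∈ commaIdxI cs 0 ↔ ∃ k : Nat, j = (k : Int) ∧ cs[k]? = some ',' := by
  rw [mem_commaIdxI]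
  constructor
  · rintro ⟨k, h1, h2⟩; exact ⟨k, by omega, h2⟩
  · rintro ⟨k, h1, h2⟩; exact ⟨k, by omega, h2⟩

-- ===== VERDICT (by name: the statement is the Claim_ definition above) =====
theorem make_title_lines_spec : Claim_equal_make_title_lines := by
  intro title max_len _
  unfold Spec_make_title_lines
  unfold make_title_lines make_title_lines_alt
  set cs := title.toList with hcs
  by_cases hlen : (cs.length : Int) ≤ max_len
  · simp [hlen]
  · simp only [hlen, if_false, if_neg hlen]
    have hmid : PySem.Int.floordiv (cs.length : Int) 2 = ((cs.length / 2 : Nat) : Int) := by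
      exact_mod_cast PySem.Int.floordiv_natCast cs.length 2
    set m : Nat := cs.length / 2 with hm
    rw [enum_comma cs 0, hmid]
    -- analyse whether there is any comma
    rcases hC : commaIdxI cs 0 with _ | ⟨c0, rest⟩
    · -- no commas: A returns title; B's search finds nothing
      have hnone : searchComma cs m 0 cs.length = none := by
        cases hs : searchComma cs m 0 cs.length with
        | none => rfl
        | some b =>
          obtain ⟨h1, _, _, _⟩ := search_some cs m cs.length 0 b hs
          have : (b : Int) ∈ commaIdxI cs 0 := (mem_commaIdxI_zero cs b).mpr ⟨b, rfl, h1⟩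
          rw [hC] at this; simp at this
      simp [hnone]
    · -- at least one comma
      have hc0 : ∃ k : Nat, c0 = (k : Int) ∧ cs[k]? = some ',' :=
        (mem_commaIdxI_zero cs c0).mp (by rw [hC]; exact List.mem_cons_self)
      obtain ⟨k0, hk0e, hk0c⟩ := hc0
      have hk0l : k0 < cs.length := (List.getElem?_eq_some_iff.mp hk0c).1
      -- B's search succeeds
      cases hs : searchComma cs m 0 cs.length with
      | none =>
        exfalso
        rcases search_none cs m cs.length 0 hs k0 hk0c with h | h
        · omega
        · unfold cdist at h; split at h <;> omega
      | some bB =>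
        obtain ⟨hBc, _, hBmin, hBtie⟩ := search_some cs m cs.length 0 bB hs
        -- A's min
        set key : Int → Int := fun i => |i - (m : Int)| with hkey
        rw [min?_eq_fmin key rest c0]
        set bA : Int := fmin key c0 rest with hbA
        -- properties of bA
        have hpair : (c0 :: rest).Pairwise (· < ·) := by
          rw [← hC]; exact pairwise_commaIdxI cs 0
        have hAmem : bA ∈ c0 :: rest ∧ (∀ y ∈ c0 :: rest, key bA ≤ key y) ∧
            (∀ y ∈ c0 :: rest, key y = key bA → bA ≤ y) := by
          rcases fmin_split key rest c0 with ⟨heq, hall⟩ | ⟨pre, post, hsplit, hklt, hpre, hpost⟩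
          · rw [← hbA] at heq
            refine ⟨by rw [heq]; exact List.mem_cons_self, ?_, ?_⟩
            · intro y hy
              rcases List.mem_cons.mp hy with h | h
              · rw [heq, h]
              · rw [heq]; exact hall y h
            · intro y hy _
              rcases List.mem_cons.mp hy with h | h
              · rw [heq, h]
              · rw [heq]; exact le_of_lt ((List.pairwise_cons.mp hpair).1 y h)
          · rw [← hbA] at hsplit hklt hpre hpost
            have hceq : c0 :: rest = (c0 :: pre) ++ bA :: post := by simp [hsplit]
            refine ⟨by rw [hceq]; exact List.mem_append_right _ List.mem_cons_self, ?_, ?_⟩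
            · intro y hy
              rw [hceq] at hy
              rcases List.mem_append.mp hy with h | h
              · rcases List.mem_cons.mp h with h' | h'
                · exact h' ▸ le_of_lt hklt
                · exact le_of_lt (hpre y h')
              · rcases List.mem_cons.mp h with h' | h'
                · rw [h']
                · exact hpost y h'
            · intro y hy hyk
              rw [hceq] at hy
              rcases List.mem_append.mp hy with h | h
              · exfalso
                rcases List.mem_cons.mp h with h' | h'
                · exact absurd hyk (by rw [h']; exact ne_of_gt hklt)
                · exact absurd hyk (ne_of_gt (hpre y h'))
              · rcases List.mem_cons.mp h with h' | h'
                · rw [h']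
                · have hp2 : (bA :: post).Pairwise (· < ·) :=
                    ((List.pairwise_append.mp (hceq ▸ hpair)).2.1)
                  exact le_of_lt ((List.pairwise_cons.mp hp2).1 y h')
          -- bA as a Nat
        obtain ⟨a, hae, hac⟩ : ∃ k : Nat, bA = (k : Int) ∧ cs[k]? = some ',' :=
          (mem_commaIdxI_zero cs bA).mp (by rw [hC]; exact hAmem.1)
        have hBmem : (bB : Int) ∈ c0 :: rest := by
          rw [← hC]; exact (mem_commaIdxI_zero cs bB).mpr ⟨bB, rfl, hBc⟩
        -- keys agree and ties force equality
        have hkeyA : key bA = ((cdist m a : Nat) : Int) := by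
          rw [hae, hkey]; exact abs_eq_cdist m a
        have hkeyB : key (bB : Int) = ((cdist m bB : Nat) : Int) := abs_eq_cdist m bB
        have h1 : cdist m a ≤ cdist m bB := by
          have := hAmem.2.1 (bB : Int) hBmem
          rw [hkeyA, hkeyB] at this; exact_mod_cast this
        have h2 : cdist m bB ≤ cdist m a := hBmin a hac (by omega)
        have h3 : bB ≤ a := hBtie a hac (by omega)
        have h4 : (a : Int) ≤ (bB : Int) := by
          have := hAmem.2.2 (bB : Int) hBmem (by rw [hkeyA, hkeyB]; congr 1; omega)
          rw [hae] at this; exact this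
        have hab : a = bB := by omega
        subst hab
        rw [hae]
        have hslice1 : PySem.List.slice cs none (some ((a : Int) + 1)) = cs.take (a + 1) := by
          have : ((a : Int) + 1) = ((a + 1 : Nat) : Int) := by push_cast; ring
          rw [this, PySem.List.slice_to_natCast]
        have hslice2 : PySem.List.slice cs (some ((a : Int) + 1)) none = cs.drop (a + 1) := by
          have : ((a : Int) + 1) = ((a + 1 : Nat) : Int) := by push_cast; ring
          rw [this, PySem.List.slice_from_natCast]
        rw [if_neg (List.cons_ne_nil c0 rest)]
        simp only [hslice1, hslice2]
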